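-- pv_equiv track=rewrite | github.com/jinit24/Scrabble-bot | og_bot_1.py | get_word_on_left
-- ===== SOURCE A (Python) =====
-- def get_word_on_left(board, start_point):
--
-- 	x,y = start_point
-- 	s = ""
--
-- 	for i in range(y, -1, -1):
-- 		if(board[x][i] == " "):
-- 			break
-- 		else:
-- 			s  = board[x][i] + s
--
-- 	return s
--
-- board =  [[" " for x in range(15)] for y in range(15)]
-- ===== SOURCE B (Python) =====
-- def get_word_on_left(board, start_point):
--     # Forward pass: scan the row prefix left-to-right, resetting the collected
--     # tail on every blank cell, then join what is left after the last blank.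
--     x, y = start_point
--     if y < 0:
--         return ""
--     tail = []
--     for cell in board[x][:y + 1]:
--         if cell == " ":
--             tail = []
--         else:
--             tail.append(cell)
--     return "".join(tail)
-- ===== Notes on version B (the rewrite author's own statement) =====
-- stated objective: alternative
-- what changed: Replaces A's backward scan from y with break-on-space by a forward scan over the row prefix board[x][:y+1] that resets its accumulator at each blank cell and joins the remainder; same O(y) cost, opposite traversal direction and no break.
import Mathlib
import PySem

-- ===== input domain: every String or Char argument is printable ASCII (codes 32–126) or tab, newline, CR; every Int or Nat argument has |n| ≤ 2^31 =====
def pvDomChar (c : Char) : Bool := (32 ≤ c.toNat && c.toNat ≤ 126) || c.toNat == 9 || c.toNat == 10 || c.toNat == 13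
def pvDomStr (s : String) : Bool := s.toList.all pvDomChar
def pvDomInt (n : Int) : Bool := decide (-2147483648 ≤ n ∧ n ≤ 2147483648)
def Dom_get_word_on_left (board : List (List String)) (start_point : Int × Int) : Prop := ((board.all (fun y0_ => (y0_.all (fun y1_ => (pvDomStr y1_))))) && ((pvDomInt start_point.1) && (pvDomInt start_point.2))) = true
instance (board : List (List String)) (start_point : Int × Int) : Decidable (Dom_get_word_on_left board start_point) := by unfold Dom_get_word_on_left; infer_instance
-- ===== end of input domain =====

-- B replaces A's backward break-on-space scan by a forward reset-on-blank scan over the row prefix plus a join (alternative decomposition, same cost).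


-- ===== PORT A =====
-- A's loop 'for i in range(y, -1, -1)': board[x][i] read each step; break on " ", else prepend.
def get_word_on_left_loop (board : List (List String)) (x : Int) : List Int → String → String
  | [], s => s
  | i :: rest, s =>
    match (PySem.List.pyGet? board x).bind (fun row => PySem.List.pyGet? row i) with
    | none => s  -- IndexError in Python; excluded by Pre_
    | some c => if c = " " then s else get_word_on_left_loop board x rest (c ++ s)

def get_word_on_left (board : List (List String)) (start_point : Int × Int) : String :=
  get_word_on_left_loop board start_point.1 (PySem.List.pyRange start_point.2 (-1) (-1)) ""

-- ===== PORT B =====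
-- B's forward loop over board[x][:y+1], resetting the tail at each blank cell.
def get_word_on_left_alt_loop : List String → List String → List String
  | [], tail => tail
  | c :: rest, tail => get_word_on_left_alt_loop rest (if c = " " then [] else tail ++ [c])

def get_word_on_left_alt (board : List (List String)) (start_point : Int × Int) : String :=
  if start_point.2 < 0 then ""
  else
    let row := (PySem.List.pyGet? board start_point.1).getD []  -- board[x]; IndexError excluded by Pre_
    PySem.Str.join "" (get_word_on_left_alt_loop (PySem.List.slice row none (some (start_point.2 + 1))) [])

-- ===== PRECONDITION & SPEC =====
-- Pre_ excludes exactly the inputs on which Python A raises IndexError: y ≥ 0 with x out of range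
-- for board, or y ≥ 0 with y beyond the end of row board[x] (for y < 0 A's loop body never runs).
def Pre_get_word_on_left (board : List (List String)) (start_point : Int × Int) : Prop :=
  start_point.2 < 0 ∨
    (-(board.length : Int) ≤ start_point.1 ∧ start_point.1 < (board.length : Int) ∧
      start_point.2 < (((PySem.List.pyGet? board start_point.1).getD []).length : Int))
instance (board : List (List String)) (start_point : Int × Int) : Decidable (Pre_get_word_on_left board start_point) := by unfold Pre_get_word_on_left; infer_instance

def pvWitness_get_word_on_left : List (List String) × (Int × Int) := ([["c", " ", "a", "b"]], (0, 3))

def Spec_get_word_on_left (board : List (List String)) (start_point : Int × Int) (out : String) : Prop := out = get_word_on_left_alt board start_point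
instance (board : List (List String)) (start_point : Int × Int) (out : String) : Decidable (Spec_get_word_on_left board start_point out) := by unfold Spec_get_word_on_left; infer_instance

-- ===== CLAIM (what is proved, stated in full; the proofs are below) =====
def Claim_equal_get_word_on_left : Prop := ∀ (board : List (List String)) (start_point : Int × Int), Dom_get_word_on_left board start_point → Pre_get_word_on_left board start_point → Spec_get_word_on_left board start_point (get_word_on_left board start_point)

-- ===== LEMMAS AND PROOFS =====

-- A's loop with the cell values inlined: process the reversed prefix, prepending until a blank.
def revApp : List String → String → String
  | [], s => s
  | c :: r, s => if c = " " then s else revApp r (c ++ s)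

-- "".join on the Chars side.
def join0 (l : List String) : List Char := PySem.Chars.join [] (l.map String.toList)

theorem join0_cons (a : String) (l : List String) : join0 (a :: l) = a.toList ++ join0 l := by
  cases l with
  | nil => simp [join0, PySem.Chars.join_singleton, PySem.Chars.join_nil]
  | cons b r => simp [join0, PySem.Chars.join_cons_cons]

theorem join0_append_singleton (l : List String) (c : String) :
    join0 (l ++ [c]) = join0 l ++ c.toList := by
  induction l with
  | nil => simp [join0, PySem.Chars.join_nil]
  | cons a r ih => simp [join0_cons, ih]

theorem altLoop_append (l m t : List String) :
    get_word_on_left_alt_loop (l ++ m) t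
      = get_word_on_left_alt_loop m (get_word_on_left_alt_loop l t) := by
  induction l generalizing t with
  | nil => simp [get_word_on_left_alt_loop]
  | cons a r ih => simp [get_word_on_left_alt_loop, ih]

theorem revApp_acc (r : List String) (s : String) :
    (revApp r s).toList = (revApp r "").toList ++ s.toList := by
  induction r generalizing s with
  | nil => simp [revApp]
  | cons c r ih =>
      by_cases hc : c = " "
      · simp [revApp, hc]
      · simp only [revApp, if_neg hc]
        rw [ih (c ++ s), ih (c ++ "")]
        simp

-- core: forward reset-scan then join = backward break-scan, on the Chars side
theorem join0_altLoop (cells : List String) :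
    join0 (get_word_on_left_alt_loop cells []) = (revApp cells.reverse "").toList := by
  induction cells using List.reverseRecOn with
  | nil => simp [get_word_on_left_alt_loop, revApp, join0, PySem.Chars.join_nil]
  | append_singleton l c ih =>
      rw [altLoop_append]
      by_cases hc : c = " "
      · simp [get_word_on_left_alt_loop, hc, revApp, join0, PySem.Chars.join_nil]
      · simp only [get_word_on_left_alt_loop, if_neg hc, List.reverse_append,
          List.reverse_singleton, List.singleton_append, revApp]
        rw [join0_append_singleton, ih, revApp_acc l.reverse (c ++ "")]
        simp

-- A's loop over range(n, -1, -1) reading row = A's loop over the reversed prefix values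
theorem loopA_eq (board : List (List String)) (x : Int) (row : List String)
    (hrow : PySem.List.pyGet? board x = some row) (n : Nat) (h : n < row.length) (s : String) :
    get_word_on_left_loop board x (PySem.List.pyRange (n : Int) (-1) (-1)) s
      = revApp ((row.take (n + 1)).reverse) s := by
  induction n generalizing s with
  | zero =>
      rw [PySem.List.pyRange_neg_one_cons (by omega)]
      have h0 : PySem.List.pyRange (((0 : Nat) : Int) - 1) (-1) (-1) = [] :=
        PySem.List.pyRange_neg_one_eq_nil (by omega)
      rw [h0]
      simp only [get_word_on_left_loop, hrow, Option.bind_some,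
        PySem.List.pyGet?_natCast, List.getElem?_eq_getElem h]
      rw [List.take_add_one]
      simp [List.getElem?_eq_getElem h, revApp]
  | succ m ih =>
      have hm : m < row.length := by omega
      rw [PySem.List.pyRange_neg_one_cons (by omega)]
      have hc : ((m + 1 : Nat) : Int) - 1 = (m : Int) := by push_cast; ring
      rw [hc]
      simp only [get_word_on_left_loop, hrow, Option.bind_some,
        PySem.List.pyGet?_natCast, List.getElem?_eq_getElem h]
      rw [List.take_add_one]
      simp only [List.getElem?_eq_getElem h, Option.toList_some, List.reverse_append,
        List.reverse_singleton, List.singleton_append, revApp]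
      by_cases hsp : row[m + 1] = " "
      · simp [hsp]
      · simp only [if_neg hsp]
        exact ih hm _

-- ===== VERDICT (by name: the statement is the Claim_ definition above) =====
theorem get_word_on_left_spec : Claim_equal_get_word_on_left := by
  intro board sp _ hpre
  unfold Spec_get_word_on_left
  obtain ⟨x, y⟩ := sp
  by_cases hy : y < 0
  · -- loop body never runs; both return ""
    have hr : PySem.List.pyRange y (-1) (-1) = [] :=
      PySem.List.pyRange_neg_one_eq_nil (by omega)
    simp [get_word_on_left, get_word_on_left_alt, hr, get_word_on_left_loop, hy]
  · rcases hpre with hpre | ⟨hx1, hx2, hylen⟩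
    · exact absurd hpre hy
    · obtain ⟨row, hrow⟩ : ∃ row, PySem.List.pyGet? board x = some row := by
        cases hg : PySem.List.pyGet? board x with
        | none =>
            rw [PySem.List.pyGet?_eq_none_iff] at hg
            exact absurd ⟨hx1, hx2⟩ hg
        | some r => exact ⟨r, rfl⟩
      rw [hrow] at hylen
      simp only [Option.getD_some] at hylen
      have hy0 : 0 ≤ y := by omega
      set yn : Nat := y.toNat with hyn
      have hyy : y = (yn : Int) := by omega
      have hlt : yn < row.length := by omega
      have hslice : PySem.List.slice row none (some (y + 1)) = row.take (yn + 1) := by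
        rw [PySem.List.slice_to row (b := y + 1) (by omega)]
        congr 1
        omega
      have hA : get_word_on_left board (x, y) = revApp ((row.take (yn + 1)).reverse) "" := by
        unfold get_word_on_left
        rw [show (x, y).2 = (yn : Int) from hyy]
        exact loopA_eq board x row hrow yn hlt ""
      have hB : get_word_on_left_alt board (x, y)
          = PySem.Str.join "" (get_word_on_left_alt_loop (row.take (yn + 1)) []) := by
        unfold get_word_on_left_alt
        simp only [hy, if_false, hrow, Option.getD_some]
        rw [hslice]
      rw [hA, hB]
      have hchars : (PySem.Str.join "" (get_word_on_left_alt_loop (row.take (yn + 1)) []) : String).toList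
          = (revApp ((row.take (yn + 1)).reverse) "").toList := by
        rw [PySem.Str.toList_join]
        have : PySem.Chars.join ("" : String).toList ((get_word_on_left_alt_loop (row.take (yn + 1)) []).map String.toList)
            = join0 (get_word_on_left_alt_loop (row.take (yn + 1)) []) := by
          simp [join0]
        rw [this, join0_altLoop]
      have := congrArg String.ofList hchars
      simpa using this.symm
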